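-- pv_equiv track=rewrite | github.com/moshemoses/engGematria | parse1.py | letter_val
-- ===== SOURCE A (Python) =====
-- def letter_val(letter):
--   letter = letter.lower()
--   alphabetOnes = ["a", "b", "c", "d", "e", "f", "g", "h", "i"]
--
--   alphabetTens = ["j", "k", "l", "m", "n", "o", "p", "q", "r"]
--
--   alphabetHundreds=["s", "t", "u", "v", "w", "x", "y", "z"]
--
--
--   for i in range(0, len(alphabetOnes)):
--     if letter == alphabetOnes[i]:
--       return(i+1)
--
--   for i in range(0, len(alphabetTens)):
--     if letter == alphabetTens[i]:
--       return((i+1)*10)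
--
--   for i in range(0, len(alphabetHundreds)):
--     if letter == alphabetHundreds[i]:
--       return((i+1)*100)
--
--
--   return 0
-- ===== SOURCE B (Python) =====
-- def letter_val(letter):
--   letter = letter.lower()
--   if len(letter) == 1 and 'a' <= letter <= 'z':
--     p = ord(letter) - ord('a')
--     if p <= 8:
--       return p + 1
--     if p <= 17:
--       return (p - 8) * 10
--     return (p - 17) * 100
--   return 0
-- ===== Notes on version B (the rewrite author's own statement) =====
-- stated objective: simpler
-- what changed: Replaces A's three sequential list scans with early return by a closed-form arithmetic computation on the lowercased character's code (alphabet position mapped to the ones/tens/hundreds band).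
import Mathlib
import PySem

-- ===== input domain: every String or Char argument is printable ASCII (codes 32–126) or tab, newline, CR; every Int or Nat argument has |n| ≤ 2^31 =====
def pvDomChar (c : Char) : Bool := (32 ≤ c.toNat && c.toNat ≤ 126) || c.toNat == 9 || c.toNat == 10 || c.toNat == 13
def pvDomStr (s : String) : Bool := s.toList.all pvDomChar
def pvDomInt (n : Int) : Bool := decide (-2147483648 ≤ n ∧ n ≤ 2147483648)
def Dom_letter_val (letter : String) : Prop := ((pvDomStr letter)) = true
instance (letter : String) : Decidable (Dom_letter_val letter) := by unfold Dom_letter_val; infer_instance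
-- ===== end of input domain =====

-- B replaces A's three sequential list scans by a closed-form computation on the character code (objective: simpler).

-- ===== PORT A =====
-- one `for i in range(0, len(xs)): if letter == xs[i]: return (i+1)*mul` loop of A
def pvBandScan (l : String) : List String → Int → Int → Option Int
  | [], _, _ => none
  | x :: rest, i, mul => if l == x then some ((i + 1) * mul) else pvBandScan l rest (i + 1) mul

def letter_val (letter : String) : Int :=
  let l := PySem.Str.lower letter
  let alphabetOnes := ["a", "b", "c", "d", "e", "f", "g", "h", "i"]
  let alphabetTens := ["j", "k", "l", "m", "n", "o", "p", "q", "r"]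
  let alphabetHundreds := ["s", "t", "u", "v", "w", "x", "y", "z"]
  match pvBandScan l alphabetOnes 0 1 with
  | some v => v
  | none =>
    match pvBandScan l alphabetTens 0 10 with
    | some v => v
    | none =>
      match pvBandScan l alphabetHundreds 0 100 with
      | some v => v
      | none => 0

-- ===== PORT B =====
def letter_val_alt (letter : String) : Int :=
  match (PySem.Str.lower letter).toList with
  | [c] =>
    if 'a' ≤ c ∧ c ≤ 'z' then
      let p : Int := (c.toNat : Int) - 97
      if p ≤ 8 then p + 1
      else if p ≤ 17 then (p - 8) * 10
      else (p - 17) * 100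
    else 0
  | _ => 0

-- ===== PRECONDITION & SPEC =====
def Spec_letter_val (letter : String) (out : Int) : Prop := out = letter_val_alt letter
instance (letter : String) (out : Int) : Decidable (Spec_letter_val letter out) := by unfold Spec_letter_val; infer_instance

-- ===== CLAIM (what is proved, stated in full; the proofs are below) =====
def Claim_equal_letter_val : Prop := ∀ (letter : String), Dom_letter_val letter → Spec_letter_val letter (letter_val letter)

-- ===== LEMMAS AND PROOFS =====

theorem pv_char_eq_iff (c d : Char) : c = d ↔ c.toNat = d.toNat :=
  ⟨fun h => h ▸ rfl, fun h => Char.ext (UInt32.toNat_inj.mp h)⟩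

theorem pv_char_le_iff (c d : Char) : c ≤ d ↔ c.toNat ≤ d.toNat := by
  rw [Char.le_def, UInt32.le_iff_toNat_le]
  exact Iff.rfl

theorem pv_scan_none (l : String) (xs : List String) (i mul : Int)
    (hall : ∀ x ∈ xs, (l == x) = false) : pvBandScan l xs i mul = none := by
  induction xs generalizing i with
  | nil => rfl
  | cons x rest ih =>
    unfold pvBandScan
    have hcond : ¬((l == x) = true) := by
      rw [hall x List.mem_cons_self]
      exact Bool.noConfusion
    rw [if_neg hcond]
    exact ih (i + 1) (fun y hy => hall y (List.mem_cons_of_mem x hy))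

theorem pv_ne_of_toList_ne (s t : String) (hne : s.toList ≠ t.toList) : (s == t) = false := by
  rw [beq_eq_false_iff_ne]
  exact fun he => hne (he ▸ rfl)

theorem pv_len_ones : ∀ x ∈ (["a", "b", "c", "d", "e", "f", "g", "h", "i"] : List String), x.toList.length = 1 := by decide
theorem pv_len_tens : ∀ x ∈ (["j", "k", "l", "m", "n", "o", "p", "q", "r"] : List String), x.toList.length = 1 := by decide
theorem pv_len_hund : ∀ x ∈ (["s", "t", "u", "v", "w", "x", "y", "z"] : List String), x.toList.length = 1 := by decide

set_option maxHeartbeats 2000000 in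
theorem pv_core (letter : String) : letter_val letter = letter_val_alt letter := by
  unfold letter_val letter_val_alt
  generalize PySem.Str.lower letter = s
  dsimp only
  rcases h : s.toList with _ | ⟨c, _ | ⟨d, tl⟩⟩
  · -- empty string: every comparison fails (length mismatch)
    have wl : ∀ (x : String), x.toList.length = 1 → (s == x) = false := by
      intro x hx
      apply pv_ne_of_toList_ne
      intro he
      rw [h] at he
      have hl := congrArg List.length he
      rw [hx] at hl
      simp at hl
    rw [pv_scan_none s _ 0 1 (fun x hx => wl x (pv_len_ones x hx)),
        pv_scan_none s _ 0 10 (fun x hx => wl x (pv_len_tens x hx)),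
        pv_scan_none s _ 0 100 (fun x hx => wl x (pv_len_hund x hx))]
  · -- single character
    have hofl : s = String.ofList [c] := by rw [← h, String.ofList_toList]
    rw [hofl]
    have wf : ∀ (t : String) (e : Char), t.toList = [e] → c ≠ e →
        (String.ofList [c] == t) = false := by
      intro t e ht he
      apply pv_ne_of_toList_ne
      rw [String.toList_ofList, ht]
      intro h2
      injection h2 with h3 _
      exact he h3
    by_cases h0 : c = 'a'
    · subst h0; decide
    by_cases h1 : c = 'b'
    · subst h1; decide
    by_cases h2 : c = 'c'
    · subst h2; decide
    by_cases h3 : c = 'd'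
    · subst h3; decide
    by_cases h4 : c = 'e'
    · subst h4; decide
    by_cases h5 : c = 'f'
    · subst h5; decide
    by_cases h6 : c = 'g'
    · subst h6; decide
    by_cases h7 : c = 'h'
    · subst h7; decide
    by_cases h8 : c = 'i'
    · subst h8; decide
    by_cases h9 : c = 'j'
    · subst h9; decide
    by_cases h10 : c = 'k'
    · subst h10; decide
    by_cases h11 : c = 'l'
    · subst h11; decide
    by_cases h12 : c = 'm'
    · subst h12; decide
    by_cases h13 : c = 'n'
    · subst h13; decide
    by_cases h14 : c = 'o'
    · subst h14; decide
    by_cases h15 : c = 'p'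
    · subst h15; decide
    by_cases h16 : c = 'q'
    · subst h16; decide
    by_cases h17 : c = 'r'
    · subst h17; decide
    by_cases h18 : c = 's'
    · subst h18; decide
    by_cases h19 : c = 't'
    · subst h19; decide
    by_cases h20 : c = 'u'
    · subst h20; decide
    by_cases h21 : c = 'v'
    · subst h21; decide
    by_cases h22 : c = 'w'
    · subst h22; decide
    by_cases h23 : c = 'x'
    · subst h23; decide
    by_cases h24 : c = 'y'
    · subst h24; decide
    by_cases h25 : c = 'z'
    · subst h25; decide
    rw [pv_scan_none _ _ 0 1
      (by intro x hx
          simp only [List.mem_cons, List.not_mem_nil, or_false] at hx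
          rcases hx with rfl|rfl|rfl|rfl|rfl|rfl|rfl|rfl|rfl
          exacts [wf _ 'a' rfl h0, wf _ 'b' rfl h1, wf _ 'c' rfl h2, wf _ 'd' rfl h3, wf _ 'e' rfl h4, wf _ 'f' rfl h5, wf _ 'g' rfl h6, wf _ 'h' rfl h7, wf _ 'i' rfl h8]),
        pv_scan_none _ _ 0 10
      (by intro x hx
          simp only [List.mem_cons, List.not_mem_nil, or_false] at hx
          rcases hx with rfl|rfl|rfl|rfl|rfl|rfl|rfl|rfl|rfl
          exacts [wf _ 'j' rfl h9, wf _ 'k' rfl h10, wf _ 'l' rfl h11, wf _ 'm' rfl h12, wf _ 'n' rfl h13, wf _ 'o' rfl h14, wf _ 'p' rfl h15, wf _ 'q' rfl h16, wf _ 'r' rfl h17]),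
        pv_scan_none _ _ 0 100
      (by intro x hx
          simp only [List.mem_cons, List.not_mem_nil, or_false] at hx
          rcases hx with rfl|rfl|rfl|rfl|rfl|rfl|rfl|rfl
          exacts [wf _ 's' rfl h18, wf _ 't' rfl h19, wf _ 'u' rfl h20, wf _ 'v' rfl h21, wf _ 'w' rfl h22, wf _ 'x' rfl h23, wf _ 'y' rfl h24, wf _ 'z' rfl h25])]
    have key : ¬('a' ≤ c ∧ c ≤ 'z') := by
      rintro ⟨ha, hz⟩
      rw [pv_char_le_iff] at ha hz
      have ha' : 97 ≤ c.toNat := ha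
      have hz' : c.toNat ≤ 122 := hz
      have m0 : c.toNat ≠ 97 := fun hh => h0 ((pv_char_eq_iff c 'a').mpr hh)
      have m1 : c.toNat ≠ 98 := fun hh => h1 ((pv_char_eq_iff c 'b').mpr hh)
      have m2 : c.toNat ≠ 99 := fun hh => h2 ((pv_char_eq_iff c 'c').mpr hh)
      have m3 : c.toNat ≠ 100 := fun hh => h3 ((pv_char_eq_iff c 'd').mpr hh)
      have m4 : c.toNat ≠ 101 := fun hh => h4 ((pv_char_eq_iff c 'e').mpr hh)
      have m5 : c.toNat ≠ 102 := fun hh => h5 ((pv_char_eq_iff c 'f').mpr hh)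
      have m6 : c.toNat ≠ 103 := fun hh => h6 ((pv_char_eq_iff c 'g').mpr hh)
      have m7 : c.toNat ≠ 104 := fun hh => h7 ((pv_char_eq_iff c 'h').mpr hh)
      have m8 : c.toNat ≠ 105 := fun hh => h8 ((pv_char_eq_iff c 'i').mpr hh)
      have m9 : c.toNat ≠ 106 := fun hh => h9 ((pv_char_eq_iff c 'j').mpr hh)
      have m10 : c.toNat ≠ 107 := fun hh => h10 ((pv_char_eq_iff c 'k').mpr hh)
      have m11 : c.toNat ≠ 108 := fun hh => h11 ((pv_char_eq_iff c 'l').mpr hh)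
      have m12 : c.toNat ≠ 109 := fun hh => h12 ((pv_char_eq_iff c 'm').mpr hh)
      have m13 : c.toNat ≠ 110 := fun hh => h13 ((pv_char_eq_iff c 'n').mpr hh)
      have m14 : c.toNat ≠ 111 := fun hh => h14 ((pv_char_eq_iff c 'o').mpr hh)
      have m15 : c.toNat ≠ 112 := fun hh => h15 ((pv_char_eq_iff c 'p').mpr hh)
      have m16 : c.toNat ≠ 113 := fun hh => h16 ((pv_char_eq_iff c 'q').mpr hh)
      have m17 : c.toNat ≠ 114 := fun hh => h17 ((pv_char_eq_iff c 'r').mpr hh)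
      have m18 : c.toNat ≠ 115 := fun hh => h18 ((pv_char_eq_iff c 's').mpr hh)
      have m19 : c.toNat ≠ 116 := fun hh => h19 ((pv_char_eq_iff c 't').mpr hh)
      have m20 : c.toNat ≠ 117 := fun hh => h20 ((pv_char_eq_iff c 'u').mpr hh)
      have m21 : c.toNat ≠ 118 := fun hh => h21 ((pv_char_eq_iff c 'v').mpr hh)
      have m22 : c.toNat ≠ 119 := fun hh => h22 ((pv_char_eq_iff c 'w').mpr hh)
      have m23 : c.toNat ≠ 120 := fun hh => h23 ((pv_char_eq_iff c 'x').mpr hh)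
      have m24 : c.toNat ≠ 121 := fun hh => h24 ((pv_char_eq_iff c 'y').mpr hh)
      have m25 : c.toNat ≠ 122 := fun hh => h25 ((pv_char_eq_iff c 'z').mpr hh)
      omega
    simp [key]
  · -- two or more characters: every comparison fails (length mismatch)
    have wl : ∀ (x : String), x.toList.length = 1 → (s == x) = false := by
      intro x hx
      apply pv_ne_of_toList_ne
      intro he
      rw [h] at he
      have := congrArg List.length he
      rw [hx] at this
      simp at this
    rw [pv_scan_none s _ 0 1 (fun x hx => wl x (pv_len_ones x hx)),
        pv_scan_none s _ 0 10 (fun x hx => wl x (pv_len_tens x hx)),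
        pv_scan_none s _ 0 100 (fun x hx => wl x (pv_len_hund x hx))]

-- ===== VERDICT (by name: the statement is the Claim_ definition above) =====
theorem letter_val_spec : Claim_equal_letter_val := by
  intro letter _
  unfold Spec_letter_val
  exact pv_core letter
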